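-- pv_equiv track=rewrite | github.com/Jay9115/Deep-Divers-SIH-114829 | deepsea_edna_pipeline/module1_qc_asv/scripts/marker_detect.py | _iupac_to_regex
-- ===== SOURCE A (Python) =====
-- def _iupac_to_regex(sequence: str) -> str:
--     """
--     Convert IUPAC nucleotide codes to regex pattern.
--     """
--     iupac_codes = {
--         'R': '[AG]',
--         'Y': '[CT]',
--         'S': '[GC]',
--         'W': '[AT]',
--         'K': '[GT]',
--         'M': '[AC]',
--         'B': '[CGT]',
--         'D': '[AGT]',
--         'H': '[ACT]',
--         'V': '[ACG]',
--         'N': '[ACGT]'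
--     }
--
--     regex_pattern = sequence.upper()
--     for iupac, regex in iupac_codes.items():
--         regex_pattern = regex_pattern.replace(iupac, regex)
--
--     return regex_pattern
-- ===== SOURCE B (Python) =====
-- def _iupac_to_regex(sequence: str) -> str:
--     """
--     Convert IUPAC nucleotide codes to regex pattern.
--     """
--     iupac_codes = {
--         'R': '[AG]',
--         'Y': '[CT]',
--         'S': '[GC]',
--         'W': '[AT]',
--         'K': '[GT]',
--         'M': '[AC]',
--         'B': '[CGT]',
--         'D': '[AGT]',
--         'H': '[ACT]',
--         'V': '[ACG]',
--         'N': '[ACGT]'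
--     }
--     # one table-driven pass instead of 11 whole-string replace passes
--     return sequence.upper().translate(str.maketrans(iupac_codes))
-- ===== Notes on version B (the rewrite author's own statement) =====
-- stated objective: idiomatic
-- what changed: Replaces eleven sequential whole-string str.replace passes with a single str.translate pass over the uppercased string using a str.maketrans character table.
import Mathlib
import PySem

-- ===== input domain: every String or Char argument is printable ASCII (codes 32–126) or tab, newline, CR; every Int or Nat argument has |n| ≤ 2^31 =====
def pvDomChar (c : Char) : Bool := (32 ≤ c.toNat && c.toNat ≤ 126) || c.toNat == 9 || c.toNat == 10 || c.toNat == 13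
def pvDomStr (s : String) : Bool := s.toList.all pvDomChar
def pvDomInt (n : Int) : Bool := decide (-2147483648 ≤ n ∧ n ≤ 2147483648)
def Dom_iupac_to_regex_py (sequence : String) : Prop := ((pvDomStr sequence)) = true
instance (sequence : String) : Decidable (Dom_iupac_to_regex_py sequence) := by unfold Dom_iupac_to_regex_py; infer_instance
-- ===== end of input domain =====

-- B replaces A's eleven sequential whole-string replace passes with one table-driven pass.

-- ===== PORT A =====
-- A: uppercase, then one str.replace pass per IUPAC code, in the dict's insertion order.
def iupac_to_regex_py (sequence : String) : String :=
  let p0 := PySem.Str.upper sequence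
  let p1 := PySem.Str.replace p0 "R" "[AG]"
  let p2 := PySem.Str.replace p1 "Y" "[CT]"
  let p3 := PySem.Str.replace p2 "S" "[GC]"
  let p4 := PySem.Str.replace p3 "W" "[AT]"
  let p5 := PySem.Str.replace p4 "K" "[GT]"
  let p6 := PySem.Str.replace p5 "M" "[AC]"
  let p7 := PySem.Str.replace p6 "B" "[CGT]"
  let p8 := PySem.Str.replace p7 "D" "[AGT]"
  let p9 := PySem.Str.replace p8 "H" "[ACT]"
  let p10 := PySem.Str.replace p9 "V" "[ACG]"
  let p11 := PySem.Str.replace p10 "N" "[ACGT]"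
  p11

-- ===== PORT B =====
-- hand port of str.translate with str.maketrans(iupac_codes): each character of the
-- uppercased string is mapped independently through the table (exact here: translate maps
-- each code point to its replacement string, unmapped code points pass through).
def iupacTr (c : Char) : List Char :=
  match c with
  | 'R' => "[AG]".toList
  | 'Y' => "[CT]".toList
  | 'S' => "[GC]".toList
  | 'W' => "[AT]".toList
  | 'K' => "[GT]".toList
  | 'M' => "[AC]".toList
  | 'B' => "[CGT]".toList
  | 'D' => "[AGT]".toList
  | 'H' => "[ACT]".toList
  | 'V' => "[ACG]".toList
  | 'N' => "[ACGT]".toList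
  | c => [c]

def iupac_to_regex_py_alt (sequence : String) : String :=
  String.ofList (((PySem.Str.upper sequence).toList).flatMap iupacTr)

-- ===== PRECONDITION & SPEC =====
def Spec_iupac_to_regex_py (sequence : String) (out : String) : Prop := out = iupac_to_regex_py_alt sequence
instance (sequence : String) (out : String) : Decidable (Spec_iupac_to_regex_py sequence out) := by unfold Spec_iupac_to_regex_py; infer_instance

-- ===== CLAIM (what is proved, stated in full; the proofs are below) =====
def Claim_equal_iupac_to_regex_py : Prop := ∀ (sequence : String), Dom_iupac_to_regex_py sequence → Spec_iupac_to_regex_py sequence (iupac_to_regex_py sequence)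

-- ===== LEMMAS AND PROOFS =====

-- one single-character substitution pass over a string, per character
def pvStep (o : Char) (new : List Char) (s : List Char) : List Char :=
  s.flatMap (fun c => if c == o then new else [c])

theorem pvGo_single (o : Char) (new : List Char) :
    ∀ (s : List Char) (fuel : Nat) (acc : List Char), s.length ≤ fuel →
      PySem.Chars.replace.go [o] new fuel s acc = acc.reverse ++ pvStep o new s := by
  intro s
  induction s with
  | nil =>
    intro fuel acc _
    cases fuel <;> simp [PySem.Chars.replace.go, pvStep]
  | cons c t ih =>
    intro fuel acc h
    cases fuel with
    | zero => simp at h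
    | succ n =>
      have ht : t.length ≤ n := by simpa using h
      by_cases hc : o = c
      · subst hc
        rw [show PySem.Chars.replace.go [o] new (n+1) (o :: t) acc
              = PySem.Chars.replace.go [o] new n t (new.reverse ++ acc) from by
            simp [PySem.Chars.replace.go, List.isPrefixOf]]
        rw [ih n _ ht]
        simp [pvStep]
      · have hpre : ([o].isPrefixOf (c :: t)) = false := by
          simp [List.isPrefixOf, hc]
        rw [show PySem.Chars.replace.go [o] new (n+1) (c :: t) acc
              = PySem.Chars.replace.go [o] new n t (c :: acc) from by
            simp [PySem.Chars.replace.go, hpre]]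
        rw [ih n _ ht]
        simp [pvStep, Ne.symm hc]

theorem pvReplace_single (s : List Char) (o : Char) (new : List Char) :
    PySem.Chars.replace s [o] new = pvStep o new s := by
  unfold PySem.Chars.replace
  simpa using pvGo_single o new s s.length [] le_rfl

theorem pvFlatMap_assoc (l : List Char) (f g : Char → List Char) :
    (l.flatMap f).flatMap g = l.flatMap (fun x => (f x).flatMap g) := by
  induction l <;> simp_all

theorem pvStep_flatMap (o : Char) (new : List Char) (l : List Char) (f : Char → List Char) :
    pvStep o new (l.flatMap f) = l.flatMap (fun c => pvStep o new (f c)) := by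
  simp [pvStep, pvFlatMap_assoc]

-- A's whole chain of passes applied to a single character equals the translation table
theorem pvChain_singleton (c : Char) :
    pvStep 'N' ['[', 'A', 'C', 'G', 'T', ']'] (pvStep 'V' ['[', 'A', 'C', 'G', ']'] (pvStep 'H' ['[', 'A', 'C', 'T', ']'] (pvStep 'D' ['[', 'A', 'G', 'T', ']'] (pvStep 'B' ['[', 'C', 'G', 'T', ']'] (pvStep 'M' ['[', 'A', 'C', ']'] (pvStep 'K' ['[', 'G', 'T', ']'] (pvStep 'W' ['[', 'A', 'T', ']'] (pvStep 'S' ['[', 'G', 'C', ']'] (pvStep 'Y' ['[', 'C', 'T', ']'] (pvStep 'R' ['[', 'A', 'G', ']'] ([c]))))))))))) = iupacTr c := by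
  by_cases hR : c = 'R'; · subst hR; decide
  by_cases hY : c = 'Y'; · subst hY; decide
  by_cases hS : c = 'S'; · subst hS; decide
  by_cases hW : c = 'W'; · subst hW; decide
  by_cases hK : c = 'K'; · subst hK; decide
  by_cases hM : c = 'M'; · subst hM; decide
  by_cases hB : c = 'B'; · subst hB; decide
  by_cases hD : c = 'D'; · subst hD; decide
  by_cases hH : c = 'H'; · subst hH; decide
  by_cases hV : c = 'V'; · subst hV; decide
  by_cases hN : c = 'N'; · subst hN; decide
  have htr : iupacTr c = [c] := by
    unfold iupacTr
    split <;> simp_all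
  simp [pvStep, hR, hY, hS, hW, hK, hM, hB, hD, hH, hV, hN, htr]

theorem pvChain_eq (u : List Char) :
    pvStep 'N' ['[', 'A', 'C', 'G', 'T', ']'] (pvStep 'V' ['[', 'A', 'C', 'G', ']'] (pvStep 'H' ['[', 'A', 'C', 'T', ']'] (pvStep 'D' ['[', 'A', 'G', 'T', ']'] (pvStep 'B' ['[', 'C', 'G', 'T', ']'] (pvStep 'M' ['[', 'A', 'C', ']'] (pvStep 'K' ['[', 'G', 'T', ']'] (pvStep 'W' ['[', 'A', 'T', ']'] (pvStep 'S' ['[', 'G', 'C', ']'] (pvStep 'Y' ['[', 'C', 'T', ']'] (pvStep 'R' ['[', 'A', 'G', ']'] (u))))))))))) = u.flatMap iupacTr := by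
  have hu : u = u.flatMap (fun c => [c]) := by simp
  conv_lhs => rw [hu]
  rw [pvStep_flatMap, pvStep_flatMap, pvStep_flatMap, pvStep_flatMap, pvStep_flatMap,
      pvStep_flatMap, pvStep_flatMap, pvStep_flatMap, pvStep_flatMap, pvStep_flatMap,
      pvStep_flatMap]
  rw [show (fun c => pvStep 'N' ['[', 'A', 'C', 'G', 'T', ']'] (pvStep 'V' ['[', 'A', 'C', 'G', ']'] (pvStep 'H' ['[', 'A', 'C', 'T', ']'] (pvStep 'D' ['[', 'A', 'G', 'T', ']'] (pvStep 'B' ['[', 'C', 'G', 'T', ']'] (pvStep 'M' ['[', 'A', 'C', ']'] (pvStep 'K' ['[', 'G', 'T', ']'] (pvStep 'W' ['[', 'A', 'T', ']'] (pvStep 'S' ['[', 'G', 'C', ']'] (pvStep 'Y' ['[', 'C', 'T', ']'] (pvStep 'R' ['[', 'A', 'G', ']'] ([c])))))))))))) = iupacTr from funext pvChain_singleton]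

-- ===== VERDICT (by name: the statement is the Claim_ definition above) =====
theorem iupac_to_regex_py_spec : Claim_equal_iupac_to_regex_py := by
  intro sequence _
  unfold Spec_iupac_to_regex_py iupac_to_regex_py iupac_to_regex_py_alt
  apply String.ext
  simp only [PySem.Str.toList_replace,
    show ("R" : String).toList = ['R'] from by decide,
    show ("[AG]" : String).toList = ['[', 'A', 'G', ']'] from by decide,
    show ("Y" : String).toList = ['Y'] from by decide,
    show ("[CT]" : String).toList = ['[', 'C', 'T', ']'] from by decide,
    show ("S" : String).toList = ['S'] from by decide,
    show ("[GC]" : String).toList = ['[', 'G', 'C', ']'] from by decide,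
    show ("W" : String).toList = ['W'] from by decide,
    show ("[AT]" : String).toList = ['[', 'A', 'T', ']'] from by decide,
    show ("K" : String).toList = ['K'] from by decide,
    show ("[GT]" : String).toList = ['[', 'G', 'T', ']'] from by decide,
    show ("M" : String).toList = ['M'] from by decide,
    show ("[AC]" : String).toList = ['[', 'A', 'C', ']'] from by decide,
    show ("B" : String).toList = ['B'] from by decide,
    show ("[CGT]" : String).toList = ['[', 'C', 'G', 'T', ']'] from by decide,
    show ("D" : String).toList = ['D'] from by decide,
    show ("[AGT]" : String).toList = ['[', 'A', 'G', 'T', ']'] from by decide,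
    show ("H" : String).toList = ['H'] from by decide,
    show ("[ACT]" : String).toList = ['[', 'A', 'C', 'T', ']'] from by decide,
    show ("V" : String).toList = ['V'] from by decide,
    show ("[ACG]" : String).toList = ['[', 'A', 'C', 'G', ']'] from by decide,
    show ("N" : String).toList = ['N'] from by decide,
    show ("[ACGT]" : String).toList = ['[', 'A', 'C', 'G', 'T', ']'] from by decide]
  simp only [pvReplace_single]
  rw [pvChain_eq]
  simp
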